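-- pv_equiv track=rewrite | github.com/tanyinghui/Codility-Lesson | Lesson 4/maxcounters.py | solution
-- ===== SOURCE A (Python) =====
-- def solution(N, A):
--     output = [0]*N
--     max_counter = 0
--     current_max = 0
--     for e in A:
--         if 1 <= e <= N:
--             if max_counter > output[e-1]:
--                 output[e-1] = max_counter
--             output[e-1] += 1
--             if current_max < output[e-1]:
--                 current_max = output[e-1]
--         else:
--             max_counter = current_max
--     for i in range(N):
--         if output[i] < max_counter:
--             output[i] = max_counter
--     return output
-- ===== SOURCE B (Python) =====
-- def solution(N, A):
--     output = [0] * N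
--     current_max = 0
--     for e in A:
--         if 1 <= e <= N:
--             output[e - 1] += 1
--             if output[e - 1] > current_max:
--                 current_max = output[e - 1]
--         else:
--             for i in range(N):
--                 output[i] = current_max
--     return output
-- ===== Notes on version B (the rewrite author's own statement) =====
-- stated objective: simpler
-- what changed: Replaces the lazy max_counter bookkeeping plus final fill pass with an eager version that rewrites the whole array on every max-all operation, so no deferred state or closing pass is needed.
import Mathlib
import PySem

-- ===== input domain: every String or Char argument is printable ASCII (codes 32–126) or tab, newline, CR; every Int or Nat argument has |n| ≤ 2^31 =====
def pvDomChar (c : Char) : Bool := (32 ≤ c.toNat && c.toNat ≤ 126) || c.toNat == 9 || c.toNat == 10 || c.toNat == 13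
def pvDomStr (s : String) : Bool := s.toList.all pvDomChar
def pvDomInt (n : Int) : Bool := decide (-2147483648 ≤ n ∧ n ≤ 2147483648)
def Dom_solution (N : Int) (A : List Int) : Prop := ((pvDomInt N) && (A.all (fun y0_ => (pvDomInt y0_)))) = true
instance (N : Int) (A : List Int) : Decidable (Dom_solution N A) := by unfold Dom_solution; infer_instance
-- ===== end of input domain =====

-- B replaces A's lazy max_counter bookkeeping + final fill pass with an eager rewrite of the
-- whole array at each max-all operation: simpler (no deferred state), not faster.

-- ===== PORT A =====
-- One loop iteration of A (the guard 1 <= e <= N keeps the index e-1 in range, so the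
-- getD/set at (e-1).toNat are exactly Python's output[e-1] read/write).
def solutionStep (N : Int) (s : List Int × Int × Int) (e : Int) : List Int × Int × Int :=
  let (output, max_counter, current_max) := s
  if 1 ≤ e ∧ e ≤ N then
    let i : Nat := (e - 1).toNat
    let o1 := if max_counter > output.getD i 0 then output.set i max_counter else output
    let v := o1.getD i 0 + 1
    let o2 := o1.set i v
    let cm := if current_max < v then v else current_max
    (o2, max_counter, cm)
  else
    (output, current_max, current_max)

def solution (N : Int) (A : List Int) : List Int :=
  let s := A.foldl (solutionStep N) (List.replicate N.toNat 0, 0, 0)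
  -- final pass: for i in range(N): if output[i] < max_counter: output[i] = max_counter
  s.1.map (fun x => if x < s.2.1 then s.2.1 else x)

-- ===== PORT B =====
-- One loop iteration of B: counter ops mutate in place; a max-all op rewrites every slot.
def solutionAltStep (N : Int) (s : List Int × Int) (e : Int) : List Int × Int :=
  if 1 ≤ e ∧ e ≤ N then
    let i : Nat := (e - 1).toNat
    let v := s.1.getD i 0 + 1
    let o := s.1.set i v
    (o, if v > s.2 then v else s.2)
  else
    (s.1.map (fun _ => s.2), s.2)

def solution_alt (N : Int) (A : List Int) : List Int :=
  (A.foldl (solutionAltStep N) (List.replicate N.toNat 0, 0)).1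

-- ===== PRECONDITION & SPEC =====
def Spec_solution (N : Int) (A : List Int) (out : List Int) : Prop := out = solution_alt N A
instance (N : Int) (A : List Int) (out : List Int) : Decidable (Spec_solution N A out) := by unfold Spec_solution; infer_instance

-- ===== CLAIM (what is proved, stated in full; the proofs are below) =====
def Claim_equal_solution : Prop := ∀ (N : Int) (A : List Int), Dom_solution N A → Spec_solution N A (solution N A)

-- ===== LEMMAS AND PROOFS =====

-- Invariant: B's array is A's array with max_counter applied pointwise, B's running max is A's
-- current_max, max_counter ≤ current_max, every A-entry ≤ current_max, and the length is fixed.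
theorem solution_loop_inv (N : Int) (L : List Int) :
    ∀ (oA : List Int) (mc cm : Int),
      mc ≤ cm → (∀ x ∈ oA, x ≤ cm) → oA.length = N.toNat →
      let rA := L.foldl (solutionStep N) (oA, mc, cm)
      let rB := L.foldl (solutionAltStep N) (oA.map (fun x => max x mc), cm)
      rB.1 = rA.1.map (fun x => max x rA.2.1) ∧ rB.2 = rA.2.2 ∧
      rA.2.1 ≤ rA.2.2 ∧ (∀ x ∈ rA.1, x ≤ rA.2.2) ∧ rA.1.length = N.toNat := by
  induction L with
  | nil =>
      intro oA mc cm h1 h2 hlen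
      exact ⟨rfl, rfl, h1, h2, hlen⟩
  | cons e L ih =>
      intro oA mc cm h1 h2 hlen
      simp only [List.foldl_cons]
      by_cases hg : 1 ≤ e ∧ e ≤ N
      · -- counter operation
        have hNpos : (1:Int) ≤ N := le_trans hg.1 hg.2
        have hi : (e - 1).toNat < oA.length := by
          rw [hlen]; omega
        set i : Nat := (e - 1).toNat with hidef
        have hgetmax : ((if mc > oA.getD i 0 then oA.set i mc else oA).getD i 0)
            = max (oA.getD i 0) mc := by
          split_ifs with h
          · rw [List.getD_eq_getElem _ _ (by simpa using hi), List.getElem_set_self]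
            omega
          · omega
        have hsetset : (if mc > oA.getD i 0 then oA.set i mc else oA).set i
              (max (oA.getD i 0) mc + 1) = oA.set i (max (oA.getD i 0) mc + 1) := by
          split_ifs with h
          · exact List.set_set ..
          · rfl
        have hstepA : solutionStep N (oA, mc, cm) e
            = (oA.set i (max (oA.getD i 0) mc + 1), mc,
               if cm < max (oA.getD i 0) mc + 1 then max (oA.getD i 0) mc + 1 else cm) := by
          simp only [solutionStep, if_pos hg, ← hidef, hgetmax, hsetset]
        have hgetB : ((oA.map (fun x => max x mc)).getD i 0) = max (oA.getD i 0) mc := by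
          rw [List.getD_eq_getElem _ _ (by simpa using hi),
              List.getD_eq_getElem _ _ hi, List.getElem_map]
        have hstepB : solutionAltStep N (oA.map (fun x => max x mc), cm) e
            = ((oA.map (fun x => max x mc)).set i (max (oA.getD i 0) mc + 1),
               if max (oA.getD i 0) mc + 1 > cm then max (oA.getD i 0) mc + 1 else cm) := by
          simp only [solutionAltStep, if_pos hg, ← hidef, hgetB]
        rw [hstepA, hstepB]
        set v := max (oA.getD i 0) mc + 1 with hv
        have hcm : (if v > cm then v else cm) = (if cm < v then v else cm) := by omega
        have hmapset : (oA.map (fun x => max x mc)).set i v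
            = (oA.set i v).map (fun x => max x mc) := by
          rw [List.map_set]
          have : max v mc = v := by omega
          rw [this]
        rw [hcm, hmapset]
        exact ih (oA.set i v) mc (if cm < v then v else cm)
          (by split_ifs <;> omega)
          (by intro x hx
              rcases List.mem_or_eq_of_mem_set hx with h | h
              · have := h2 x h; split_ifs <;> omega
              · subst h; split_ifs <;> omega)
          (by rw [List.length_set, hlen])
      · -- max-all operation
        have hstepA : solutionStep N (oA, mc, cm) e = (oA, cm, cm) := by
          simp only [solutionStep, if_neg hg]
        have hstepB : solutionAltStep N (oA.map (fun x => max x mc), cm) e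
            = (oA.map (fun x => max x cm), cm) := by
          simp only [solutionAltStep, if_neg hg, List.map_map]
          rw [List.map_congr_left (g := fun x => max x cm)
            (fun x hx => by have := h2 x hx; simp only [Function.comp]; omega)]
        rw [hstepA, hstepB]
        exact ih oA cm cm le_rfl h2 hlen

-- ===== VERDICT (by name: the statement is the Claim_ definition above) =====
theorem solution_spec : Claim_equal_solution := by
  intro N A _
  unfold Spec_solution solution solution_alt
  have h0 : (List.replicate N.toNat (0:Int)).map (fun x => max x 0)
      = List.replicate N.toNat 0 := by
    rw [List.map_replicate]; norm_num
  have hz : ∀ x ∈ List.replicate N.toNat (0:Int), x ≤ 0 := by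
    intro x hx; rw [List.eq_of_mem_replicate hx]
  have := solution_loop_inv N A (List.replicate N.toNat 0) 0 0 le_rfl hz
    (by rw [List.length_replicate])
  rw [h0] at this
  obtain ⟨hB, _, _, _, _⟩ := this
  rw [hB]
  exact List.map_congr_left (fun x _ => by split_ifs <;> omega)
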